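-- pv_equiv track=rewrite | github.com/5joon-kwon/Algorithm | Codetree/삼성 SW 역량테스트 기출 문제/2024 상반기 오전 1번 문제/고대 문명 유적 탐사.py | count_and_clear
-- ===== SOURCE A (Python) =====
-- from collections import deque
--
-- def bfs(ngrid, visit, si, sj, clear):
--     queue = deque()
--     sset = set() # 유물 위치 저장 위해
--     visit[si][sj] = 1
--     cnt = 0
--     queue.append((si, sj))
--     sset.add((si, sj))
--     cnt += 1
--
--     while queue:
--         i, j = queue.popleft()
--
--         for di, dj in ((-1, 0), (1, 0), (0, -1), (0, 1)):
--             ni, nj = i + di, j + dj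
--             if 0 <= ni < 5 and 0 <= nj < 5 and visit[ni][nj] == 0 and ngrid[ni][nj] == ngrid[i][j]:
--                 visit[ni][nj] = 1
--                 queue.append((ni, nj))
--                 sset.add((ni, nj))
--                 cnt += 1
--
--     if cnt >= 3:
--         if clear == 1:
--             for i, j in sset:
--                 ngrid[i][j] = 0
--         return cnt
--     else:
--         return 0
--
-- def count_and_clear(ngrid, clear): # 유물 개수 세기
--     visit = [[0] * 5 for _ in range(5)]
--     cnt = 0
--     for i in range(5):
--         for j in range(5):
--             if visit[i][j] == 0:
--                 cnt += bfs(ngrid, visit, i, j, clear)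
--     return cnt
-- ===== SOURCE B (Python) =====
-- def count_and_clear(ngrid, clear):  # return-value equivalent to A; also performs the same in-place clearing
--     def comp(si, sj):
--         cells = {(si, sj)}
--         for _ in range(25):
--             cells = cells | {(ni, nj)
--                              for (i, j) in cells
--                              for (ni, nj) in ((i - 1, j), (i + 1, j), (i, j - 1), (i, j + 1))
--                              if 0 <= ni < 5 and 0 <= nj < 5 and ngrid[ni][nj] == ngrid[i][j]}
--         return cells
--     comps = [comp(i, j) for i in range(5) for j in range(5)]
--     total = sum(1 for c in comps if len(c) >= 3)
--     if clear == 1: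
--         for c in comps:
--             if len(c) >= 3:
--                 for (i, j) in c:
--                     ngrid[i][j] = 0
--     return total
-- ===== Notes on version B (the rewrite author's own statement) =====
-- stated objective: alternative
-- what changed: A runs one BFS flood fill per unvisited cell over a shared visit grid and sums the sizes of components of size >= 3; B drops the visit grid and queue entirely, computing for every cell its same-value component by bounded set saturation (25 rounds of neighbour expansion) and counting the cells that lie in a component of size >= 3, which yields the same total.
import Mathlib
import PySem

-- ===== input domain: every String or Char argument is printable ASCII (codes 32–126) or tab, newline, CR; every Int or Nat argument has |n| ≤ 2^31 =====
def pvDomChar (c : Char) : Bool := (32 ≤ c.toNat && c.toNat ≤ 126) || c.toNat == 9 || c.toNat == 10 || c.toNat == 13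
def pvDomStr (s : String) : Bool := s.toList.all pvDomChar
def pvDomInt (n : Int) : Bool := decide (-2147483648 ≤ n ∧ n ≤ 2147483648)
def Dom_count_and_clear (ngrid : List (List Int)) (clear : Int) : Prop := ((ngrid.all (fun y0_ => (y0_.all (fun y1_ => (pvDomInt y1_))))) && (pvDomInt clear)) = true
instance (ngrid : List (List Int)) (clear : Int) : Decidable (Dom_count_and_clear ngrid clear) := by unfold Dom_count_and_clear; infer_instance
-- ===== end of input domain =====

-- B replaces A's shared-visit BFS flood fill by an independent per-cell set-saturation closure
-- and counts cells instead of components ('alternative' objective, no speed claim).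
-- A mutates ngrid in place when clear == 1 (zeroing cleared components); that side effect does not
-- influence the returned value (cleared cells are already visited), and the equivalence proved here
-- is about the RETURN value only (Source B performs the same mutation; the ports model the return value).

-- ===== PORT A =====
-- visit[i][j] / ngrid[i][j] read: indices here are always in [0,5) (guarded), rows exist under Pre_,
-- so getD is exact for Python's indexing on the admitted inputs.
def pvVAt (v : List (List Int)) (i j : Int) : Int := (v.getD i.toNat []).getD j.toNat 0

-- visit[i][j] = x (in-place update; exact for 0 ≤ i,j < 5 on a 5×5 list)
def pvVSet (v : List (List Int)) (i j x : Int) : List (List Int) :=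
  v.set i.toNat ((v.getD i.toNat []).set j.toNat x)

def pvDirs : List (Int × Int) := [(-1, 0), (1, 0), (0, -1), (0, 1)]

-- body of A's 'for di, dj in ...' loop: state = (queue-after-popped-head, visit, cnt)
def pvBfsStep (g : List (List Int)) (i j : Int)
    (st : List (Int × Int) × List (List Int) × Int) (d : Int × Int) :
    List (Int × Int) × List (List Int) × Int :=
  let ni := i + d.1
  let nj := j + d.2
  if 0 ≤ ni ∧ ni < 5 ∧ 0 ≤ nj ∧ nj < 5 ∧ pvVAt st.2.1 ni nj = 0 ∧ pvVAt g ni nj = pvVAt g i j then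
    (st.1 ++ [(ni, nj)], pvVSet st.2.1 ni nj 1, st.2.2 + 1)
  else st

-- A's 'while queue:' loop; fuel only makes the recursion structural (a 5×5 BFS pops at most
-- 25 cells and the measure 2·(unvisited)+|queue| ≤ 75 < 128 never exhausts it — proved below).
def pvBfsLoop (g : List (List Int)) :
    Nat → List (Int × Int) → List (List Int) → Int → List (List Int) × Int
  | _, [], v, c => (v, c)
  | 0, _ :: _, v, c => (v, c)
  | f + 1, (i, j) :: rest, v, c =>
      let st := pvDirs.foldl (pvBfsStep g i j) (rest, v, c)
      pvBfsLoop g f st.1 st.2.1 st.2.2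

-- A's bfs; the sset bookkeeping and the clear-mutation of ngrid are the in-place side effect
-- documented above and do not enter the returned (visit, count).
def pvBfs (g : List (List Int)) (visit : List (List Int)) (si sj : Int) :
    List (List Int) × Int :=
  let visit := pvVSet visit si sj 1
  let r := pvBfsLoop g 128 [(si, sj)] visit 1
  if 3 ≤ r.2 then (r.1, r.2) else (r.1, 0)

def count_and_clear (ngrid : List (List Int)) (clear : Int) : Int :=
  let visit := List.replicate 5 (List.replicate 5 (0 : Int))
  let res := (List.range 5).foldl (fun (st : List (List Int) × Int) i =>
    (List.range 5).foldl (fun (st : List (List Int) × Int) j =>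
      if pvVAt st.1 (i : Int) (j : Int) = 0 then
        let r := pvBfs ngrid st.1 (i : Int) (j : Int)
        (r.1, st.2 + r.2)
      else st) st) (visit, 0)
  res.2

-- ===== PORT B =====
def pvGAt (g : List (List Int)) (i j : Int) : Int := (g.getD i.toNat []).getD j.toNat 0

def pvDirsB : List (Int × Int) := [(-1, 0), (1, 0), (0, -1), (0, 1)]

-- one iteration of Source B's saturation: cells | {equal-valued in-range neighbours of cells}
def pvStepSet (g : List (List Int)) (cells : PySem.Set (Int × Int)) : PySem.Set (Int × Int) :=
  PySem.Set.union cells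
    (cells.foldl (fun acc p =>
      pvDirsB.foldl (fun acc d =>
        let ni := p.1 + d.1
        let nj := p.2 + d.2
        if 0 ≤ ni ∧ ni < 5 ∧ 0 ≤ nj ∧ nj < 5 ∧ pvGAt g ni nj = pvGAt g p.1 p.2 then
          PySem.Set.add acc (ni, nj)
        else acc) acc) PySem.Set.empty)

def pvCompB (g : List (List Int)) (si sj : Int) : PySem.Set (Int × Int) :=
  (List.range 25).foldl (fun cells _ => pvStepSet g cells) (PySem.Set.ofList [(si, sj)])

def count_and_clear_alt (ngrid : List (List Int)) (clear : Int) : Int :=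
  let comps := (List.range 5).flatMap (fun i =>
    (List.range 5).map (fun j => pvCompB ngrid (i : Int) (j : Int)))
  comps.foldl (fun t c => if 3 ≤ PySem.Set.len c then t + 1 else t) 0

-- ===== PRECONDITION & SPEC =====
-- Python A indexes ngrid[i][j] for all 0 ≤ i,j < 5: it raises IndexError unless ngrid has at
-- least 5 rows whose first 5 each have at least 5 entries. Pre_ admits exactly those inputs.
def Pre_count_and_clear (ngrid : List (List Int)) (clear : Int) : Prop :=
  5 ≤ ngrid.length ∧ ∀ r ∈ ngrid.take 5, 5 ≤ r.length

instance (ngrid : List (List Int)) (clear : Int) : Decidable (Pre_count_and_clear ngrid clear) := by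
  unfold Pre_count_and_clear; infer_instance

def pvWitness_count_and_clear : List (List Int) × Int :=
  ([[1, 1, 0, 2, 2], [1, 0, 0, 2, 3], [4, 4, 0, 3, 3], [4, 4, 1, 1, 3], [2, 2, 1, 1, 3]], 1)

def Spec_count_and_clear (ngrid : List (List Int)) (clear : Int) (out : Int) : Prop := out = count_and_clear_alt ngrid clear
instance (ngrid : List (List Int)) (clear : Int) (out : Int) : Decidable (Spec_count_and_clear ngrid clear out) := by unfold Spec_count_and_clear; infer_instance

-- ===== CLAIM (what is proved, stated in full; the proofs are below) =====
def Claim_equal_count_and_clear : Prop := ∀ (ngrid : List (List Int)) (clear : Int), Dom_count_and_clear ngrid clear → Pre_count_and_clear ngrid clear → Spec_count_and_clear ngrid clear (count_and_clear ngrid clear)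

-- ===== LEMMAS AND PROOFS =====
-- Both ports are proved equal to one common value: the number of cells of the 5×5 board whose
-- same-value connected component (pvCompF, a saturated finite closure) has at least 3 cells.

-- ===== proof infrastructure: cells, adjacency, finset closure =====
def pvGoodB (p : Int × Int) : Bool := decide (0 ≤ p.1 ∧ p.1 < 5 ∧ 0 ≤ p.2 ∧ p.2 < 5)

def pvEB (g : List (List Int)) (p q : Int × Int) : Bool :=
  pvGoodB p && pvGoodB q && decide (pvVAt g q.1 q.2 = pvVAt g p.1 p.2) &&
    decide ((q.1 - p.1, q.2 - p.2) ∈ pvDirs)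

def pvUniv : Finset (Int × Int) :=
  ((List.range 5).flatMap (fun i => (List.range 5).map (fun j => ((i : Int), (j : Int))))).toFinset

theorem pvMem_univ (p : Int × Int) : p ∈ pvUniv ↔ pvGoodB p = true := by
  obtain ⟨a, b⟩ := p
  simp [pvUniv, pvGoodB, List.mem_flatMap]
  constructor
  · rintro ⟨⟨i, hi, rfl⟩, ⟨j, hj, rfl⟩⟩; omega
  · rintro ⟨h1, h2, h3, h4⟩
    exact ⟨⟨a.toNat, by omega, by omega⟩, ⟨b.toNat, by omega, by omega⟩⟩

theorem pvCard_univ : pvUniv.card = 25 := by decide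

theorem pvEB_parts {g p q} (h : pvEB g p q = true) :
    pvGoodB p = true ∧ pvGoodB q = true ∧ pvVAt g q.1 q.2 = pvVAt g p.1 p.2 ∧
      (q.1 - p.1, q.2 - p.2) ∈ pvDirs := by
  simp only [pvEB, Bool.and_eq_true, decide_eq_true_eq] at h
  exact ⟨h.1.1.1, h.1.1.2, h.1.2, h.2⟩

theorem pvEB_symm' {g : List (List Int)} {p q : Int × Int} (h : pvEB g p q = true) :
    pvEB g q p = true := by
  simp only [pvEB, pvDirs, Bool.and_eq_true, decide_eq_true_eq, List.mem_cons,
    List.not_mem_nil, or_false, Prod.mk.injEq] at h ⊢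
  obtain ⟨⟨⟨h1, h2⟩, h3⟩, h4⟩ := h
  exact ⟨⟨⟨h2, h1⟩, h3.symm⟩, by omega⟩

def pvStepF (g : List (List Int)) (S : Finset (Int × Int)) : Finset (Int × Int) :=
  S ∪ pvUniv.filter (fun q => ∃ p ∈ S, pvEB g p q = true)

def pvCompF (g : List (List Int)) (p : Int × Int) : Finset (Int × Int) :=
  (pvStepF g)^[25] {p}

theorem pvMem_stepF {g S q} :
    q ∈ pvStepF g S ↔ q ∈ S ∨ (pvGoodB q = true ∧ ∃ p ∈ S, pvEB g p q = true) := by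
  simp [pvStepF, pvMem_univ, and_comm]

theorem pvSubset_stepF (g : List (List Int)) (S : Finset (Int × Int)) : S ⊆ pvStepF g S :=
  Finset.subset_union_left

theorem pvStepF_subset_univ {g S} (h : S ⊆ pvUniv) : pvStepF g S ⊆ pvUniv := by
  intro x hx
  rcases pvMem_stepF.mp hx with hx | ⟨hg, _⟩
  · exact h hx
  · exact (pvMem_univ x).mpr hg

theorem pvIter_subset_univ {g p} (hp : pvGoodB p = true) (n : Nat) :
    (pvStepF g)^[n] {p} ⊆ pvUniv := by
  induction n with
  | zero => simpa using (pvMem_univ p).mpr hp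
  | succ k ih => rw [Function.iterate_succ_apply']; exact pvStepF_subset_univ ih

theorem pvCompF_subset_univ {g p} (hp : pvGoodB p = true) : pvCompF g p ⊆ pvUniv :=
  pvIter_subset_univ hp 25

theorem pvIter_mono_succ (g : List (List Int)) (p : Int × Int) (n : Nat) :
    (pvStepF g)^[n] {p} ⊆ (pvStepF g)^[n + 1] {p} := by
  rw [Function.iterate_succ_apply']
  exact pvSubset_stepF _ _

theorem pvMem_compF_self (g : List (List Int)) (p : Int × Int) : p ∈ pvCompF g p := by
  have h : ∀ n, p ∈ (pvStepF g)^[n] {p} := by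
    intro n
    induction n with
    | zero => simp
    | succ k ih => exact pvIter_mono_succ g p k ih
  exact h 25
-- saturation: the 25-fold iterate is a fixpoint of pvStepF
theorem pvIter_stab {g : List (List Int)} {p : Int × Int} {n : Nat}
    (h : pvStepF g ((pvStepF g)^[n] {p}) = (pvStepF g)^[n] {p}) (m : Nat) (hm : n ≤ m) :
    (pvStepF g)^[m] {p} = (pvStepF g)^[n] {p} := by
  obtain ⟨k, rfl⟩ := Nat.exists_eq_add_of_le hm
  rw [Nat.add_comm, Function.iterate_add_apply]
  exact Function.iterate_fixed h k

theorem pvCompF_fixed {g : List (List Int)} {p : Int × Int} (hp : pvGoodB p = true) :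
    pvStepF g (pvCompF g p) = pvCompF g p := by
  by_cases hfix : ∃ n < 25, pvStepF g ((pvStepF g)^[n] {p}) = (pvStepF g)^[n] {p}
  · obtain ⟨n, hn, hf⟩ := hfix
    have h25 : (pvStepF g)^[25] {p} = (pvStepF g)^[n] {p} := pvIter_stab hf 25 (by omega)
    show pvStepF g ((pvStepF g)^[25] {p}) = (pvStepF g)^[25] {p}
    rw [h25, hf]
  · push_neg at hfix
    have hcard : ∀ n, n ≤ 25 → n + 1 ≤ ((pvStepF g)^[n] {p}).card := by
      intro n
      induction n with
      | zero => intro _; simp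
      | succ k ih =>
        intro hk
        have hne := hfix k (by omega)
        have hsub : (pvStepF g)^[k] {p} ⊆ (pvStepF g)^[k + 1] {p} := pvIter_mono_succ g p k
        have hssub : (pvStepF g)^[k] {p} ⊂ (pvStepF g)^[k + 1] {p} := by
          refine ⟨hsub, fun hba => hne ?_⟩
          rw [Function.iterate_succ_apply'] at hba
          exact le_antisymm hba (pvSubset_stepF _ _)
        have hlt := Finset.card_lt_card hssub
        have hih := ih (by omega)
        omega
    have h1 := hcard 25 (by omega)
    have h2 : ((pvStepF g)^[25] {p}).card ≤ 25 := by
      calc ((pvStepF g)^[25] {p}).card ≤ pvUniv.card :=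
            Finset.card_le_card (pvIter_subset_univ hp 25)
        _ = 25 := pvCard_univ
    exact absurd h1 (by omega)

theorem pvCompF_closed {g : List (List Int)} {p : Int × Int} (hp : pvGoodB p = true)
    {q r : Int × Int} (hq : q ∈ pvCompF g p) (he : pvEB g q r = true) : r ∈ pvCompF g p := by
  have : r ∈ pvStepF g (pvCompF g p) := by
    rw [pvMem_stepF]
    exact Or.inr ⟨(pvEB_parts he).2.1, q, hq, he⟩
  rwa [pvCompF_fixed hp] at this

theorem pvCompF_min {g : List (List Int)} {p : Int × Int} {V : Finset (Int × Int)}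
    (hcl : ∀ x ∈ V, ∀ y, pvEB g x y = true → y ∈ V) (hp : p ∈ V) : pvCompF g p ⊆ V := by
  have h : ∀ n, (pvStepF g)^[n] {p} ⊆ V := by
    intro n
    induction n with
    | zero => simpa using hp
    | succ k ih =>
      rw [Function.iterate_succ_apply']
      intro x hx
      rcases pvMem_stepF.mp hx with hx | ⟨_, r, hr, he⟩
      · exact ih hx
      · exact hcl r (ih hr) x he
  exact h 25

theorem pvCompF_symm {g : List (List Int)} {p q : Int × Int} (hp : pvGoodB p = true)
    (hq : q ∈ pvCompF g p) : p ∈ pvCompF g q := by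
  have h : ∀ n, ∀ q, q ∈ (pvStepF g)^[n] {p} → p ∈ pvCompF g q := by
    intro n
    induction n with
    | zero =>
      intro q hq
      simp only [Function.iterate_zero, id_eq, Finset.mem_singleton] at hq
      subst hq; exact pvMem_compF_self g q
    | succ k ih =>
      intro q hq
      rw [Function.iterate_succ_apply'] at hq
      rcases pvMem_stepF.mp hq with hq | ⟨_, r, hr, he⟩
      · exact ih q hq
      · -- r ∈ iter k, pvEB g r q; p ∈ comp r by ih
        have hpr : p ∈ pvCompF g r := ih r hr
        have hqgood : pvGoodB q = true := (pvEB_parts he).2.1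
        have hrq : r ∈ pvCompF g q :=
          pvCompF_closed hqgood (pvMem_compF_self g q) (pvEB_symm' he)
        have hsub : pvCompF g r ⊆ pvCompF g q :=
          pvCompF_min (fun x hx y hy => pvCompF_closed hqgood hx hy) hrq
        exact hsub hpr
  exact h 25 q hq

theorem pvCompF_class {g : List (List Int)} {p q : Int × Int} (hp : pvGoodB p = true)
    (hq : q ∈ pvCompF g p) : pvCompF g q = pvCompF g p := by
  have hqgood : pvGoodB q = true := (pvMem_univ q).mp (pvCompF_subset_univ hp hq)
  apply le_antisymm
  · exact pvCompF_min (fun x hx y hy => pvCompF_closed hp hx hy) hq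
  · exact pvCompF_min (fun x hx y hy => pvCompF_closed hqgood hx hy) (pvCompF_symm hp hq)
-- ===== the visit grid as a finite set of marked cells =====
def pvShape (v : List (List Int)) : Prop := v.length = 5 ∧ ∀ r ∈ v, r.length = 5

def pvMarks (v : List (List Int)) : Finset (Int × Int) :=
  pvUniv.filter (fun p => pvVAt v p.1 p.2 ≠ 0)

theorem pvMem_marks {v : List (List Int)} {p : Int × Int} :
    p ∈ pvMarks v ↔ pvGoodB p = true ∧ pvVAt v p.1 p.2 ≠ 0 := by
  simp [pvMarks, pvMem_univ]

theorem pvShape_init : pvShape (List.replicate 5 (List.replicate 5 (0 : Int))) := by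
  constructor
  · simp
  · intro r hr
    rw [List.eq_of_mem_replicate hr]
    simp

theorem pvMarks_init : pvMarks (List.replicate 5 (List.replicate 5 (0 : Int))) = ∅ := by
  ext p
  rw [pvMem_marks]
  simp only [Finset.notMem_empty, iff_false, not_and, not_not]
  intro hg
  simp only [pvGoodB, decide_eq_true_eq] at hg
  simp only [pvVAt]
  have h1 : p.1.toNat < 5 := by omega
  have h2 : p.2.toNat < 5 := by omega
  have houter : (List.replicate 5 (List.replicate 5 (0 : Int))).getD p.1.toNat [] =
      List.replicate 5 (0 : Int) := by
    rw [List.getD_eq_getElem?_getD, List.getElem?_eq_getElem (by simpa using h1),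
      List.getElem_replicate]
    rfl
  rw [houter, List.getD_eq_getElem?_getD, List.getElem?_eq_getElem (by simpa using h2),
    List.getElem_replicate]
  rfl

theorem pvGetD_set {α : Type} (l : List α) (m k : Nat) (x d : α) (hm : m < l.length) :
    (l.set m x).getD k d = if k = m then x else l.getD k d := by
  rw [List.getD_eq_getElem?_getD, List.getElem?_set]
  by_cases h : m = k
  · subst h
    simp [hm]
  · rw [if_neg h, if_neg (fun hh => h hh.symm), ← List.getD_eq_getElem?_getD]

theorem pvShape_set {v : List (List Int)} {i j x : Int} (h : pvShape v)
    (hi : 0 ≤ i ∧ i < 5) : pvShape (pvVSet v i j x) := by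
  obtain ⟨hl, hr⟩ := h
  constructor
  · simp [pvVSet, hl]
  · intro r hrm
    rcases List.mem_or_eq_of_mem_set hrm with hrm | rfl
    · exact hr r hrm
    · rw [List.length_set]
      have hlt : i.toNat < v.length := by omega
      have : v.getD i.toNat [] = v[i.toNat] := by
        rw [List.getD_eq_getElem?_getD, List.getElem?_eq_getElem hlt]; rfl
      rw [this]
      exact hr _ (List.getElem_mem hlt)

theorem pvVAt_set {v : List (List Int)} {i j i' j' x : Int} (h : pvShape v)
    (hi : 0 ≤ i ∧ i < 5 ∧ 0 ≤ j ∧ j < 5) (hi' : 0 ≤ i' ∧ i' < 5 ∧ 0 ≤ j' ∧ j' < 5) :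
    pvVAt (pvVSet v i j x) i' j' = if i' = i ∧ j' = j then x else pvVAt v i' j' := by
  obtain ⟨hl, hr⟩ := h
  have h1 : i.toNat < v.length := by omega
  have hrlen : (v.getD i.toNat []).length = 5 := by
    rw [List.getD_eq_getElem?_getD, List.getElem?_eq_getElem h1]
    exact hr _ (List.getElem_mem h1)
  simp only [pvVAt, pvVSet]
  rw [pvGetD_set v i.toNat i'.toNat _ [] h1]
  by_cases hii : i'.toNat = i.toNat
  · rw [if_pos hii, pvGetD_set _ j.toNat j'.toNat x 0 (by rw [hrlen]; omega)]
    have hiieq : i' = i := by omega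
    by_cases hjj : j'.toNat = j.toNat
    · have hjjeq : j' = j := by omega
      rw [if_pos hjj, if_pos ⟨hiieq, hjjeq⟩]
    · have hjjne : ¬(i' = i ∧ j' = j) := by
        rintro ⟨_, rfl⟩; exact hjj rfl
      rw [if_neg hjj, if_neg hjjne, hii]
  · have hne : ¬(i' = i ∧ j' = j) := by
      rintro ⟨rfl, _⟩; exact hii rfl
    rw [if_neg hii, if_neg hne]

theorem pvMarks_set {v : List (List Int)} {n : Int × Int} (h : pvShape v)
    (hn : pvGoodB n = true) : pvMarks (pvVSet v n.1 n.2 1) = insert n (pvMarks v) := by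
  simp only [pvGoodB, decide_eq_true_eq] at hn
  ext x
  by_cases hg : pvGoodB x = true
  · have hgx : 0 ≤ x.1 ∧ x.1 < 5 ∧ 0 ≤ x.2 ∧ x.2 < 5 := by
      simpa [pvGoodB] using hg
    rw [Finset.mem_insert, pvMem_marks, pvMem_marks,
      pvVAt_set h ⟨hn.1, hn.2.1, hn.2.2.1, hn.2.2.2⟩ hgx]
    by_cases hx : x = n
    · subst hx
      simp [hg]
    · have : ¬(x.1 = n.1 ∧ x.2 = n.2) := by
        intro hc
        exact hx (Prod.ext hc.1 hc.2)
      simp [this, hx, hg]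
  · have hxn : x ≠ n := by
      rintro rfl
      simp only [pvGoodB, decide_eq_true_eq] at hg
      omega
    simp only [Finset.mem_insert, pvMem_marks, hxn, false_or]
    constructor
    · rintro ⟨h1, _⟩; exact absurd h1 hg
    · rintro ⟨h1, _⟩; exact absurd h1 hg
-- ===== BFS correctness =====
theorem pvBfsStep_spec (g : List (List Int)) (p0 : Int × Int) (M0 : Finset (Int × Int))
    (hdisj : ∀ x ∈ pvCompF g p0, x ∉ M0) (hp0 : pvGoodB p0 = true)
    (i j : Int) (hij : (i, j) ∈ pvCompF g p0) (d : Int × Int) (hd : d ∈ pvDirs)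
    (q : List (Int × Int)) (v : List (List Int)) (V : Finset (Int × Int))
    (hshape : pvShape v) (hmarks : pvMarks v = M0 ∪ V) (hV : V ⊆ pvCompF g p0) :
    ∃ q' v' V',
      pvBfsStep g i j (q, v, (V.card : Int)) d = (q', v', (V'.card : Int)) ∧
      pvShape v' ∧ pvMarks v' = M0 ∪ V' ∧ V ⊆ V' ∧ V' ⊆ pvCompF g p0 ∧
      (∀ x ∈ q, x ∈ q') ∧ (∀ x ∈ q', x ∈ q ∨ x ∈ V') ∧ (∀ x ∈ V', x ∈ V ∨ x ∈ q') ∧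
      2 * (pvCompF g p0 \ V').card + q'.length ≤ 2 * (pvCompF g p0 \ V).card + q.length ∧
      (pvEB g (i, j) (i + d.1, j + d.2) = true → (i + d.1, j + d.2) ∈ V') := by
  have hgij : pvGoodB (i, j) = true := (pvMem_univ _).mp (pvCompF_subset_univ hp0 hij)
  by_cases hc : 0 ≤ i + d.1 ∧ i + d.1 < 5 ∧ 0 ≤ j + d.2 ∧ j + d.2 < 5 ∧
      pvVAt v (i + d.1) (j + d.2) = 0 ∧ pvVAt g (i + d.1) (j + d.2) = pvVAt g i j
  · obtain ⟨hb1, hb2, hb3, hb4, hv0, hval⟩ := hc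
    have hgn : pvGoodB (i + d.1, j + d.2) = true := by
      simp only [pvGoodB, decide_eq_true_eq]
      exact ⟨hb1, hb2, hb3, hb4⟩
    have hnV : (i + d.1, j + d.2) ∉ M0 ∪ V := by
      rw [← hmarks, pvMem_marks]
      rintro ⟨_, hne⟩
      exact hne hv0
    have hnVonly : (i + d.1, j + d.2) ∉ V := fun h => hnV (Finset.mem_union_right _ h)
    refine ⟨q ++ [(i + d.1, j + d.2)], pvVSet v (i + d.1) (j + d.2) 1,
      insert (i + d.1, j + d.2) V, ?_, ?_, ?_, ?_, ?_, ?_, ?_, ?_, ?_, ?_⟩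
    · simp only [pvBfsStep]
      rw [if_pos ⟨hb1, hb2, hb3, hb4, hv0, hval⟩]
      have hcard : ((insert (i + d.1, j + d.2) V).card : Int) = (V.card : Int) + 1 := by
        rw [Finset.card_insert_of_notMem hnVonly]
        push_cast
        ring
      rw [hcard]
    · exact pvShape_set hshape ⟨hb1, hb2⟩
    · rw [pvMarks_set hshape hgn, hmarks, Finset.union_insert]
    · exact Finset.subset_insert _ _
    · refine Finset.insert_subset ?_ hV
      refine pvCompF_closed hp0 hij ?_
      simp only [pvEB, Bool.and_eq_true, decide_eq_true_eq]
      refine ⟨⟨⟨hgij, hgn⟩, hval⟩, ?_⟩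
      have hdd : (i + d.1 - i, j + d.2 - j) = d := by
        obtain ⟨d1, d2⟩ := d
        simp only [Prod.mk.injEq]
        constructor <;> ring
      rw [hdd]
      exact hd
    · intro x hx
      exact List.mem_append_left _ hx
    · intro x hx
      rcases List.mem_append.mp hx with hx | hx
      · exact Or.inl hx
      · simp only [List.mem_singleton] at hx
        exact Or.inr (hx ▸ Finset.mem_insert_self _ _)
    · intro x hx
      rcases Finset.mem_insert.mp hx with rfl | hx
      · exact Or.inr (List.mem_append_right _ (List.mem_singleton.mpr rfl))
      · exact Or.inl hx
    · have hnC : (i + d.1, j + d.2) ∈ pvCompF g p0 \ V := by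
        rw [Finset.mem_sdiff]
        refine ⟨?_, hnVonly⟩
        refine pvCompF_closed hp0 hij ?_
        simp only [pvEB, Bool.and_eq_true, decide_eq_true_eq]
        refine ⟨⟨⟨hgij, hgn⟩, hval⟩, ?_⟩
        have hdd : (i + d.1 - i, j + d.2 - j) = d := by
          obtain ⟨d1, d2⟩ := d
          simp only [Prod.mk.injEq]
          constructor <;> ring
        rw [hdd]
        exact hd
      rw [Finset.sdiff_insert, Finset.card_erase_of_mem hnC]
      have hpos : 1 ≤ (pvCompF g p0 \ V).card := Finset.card_pos.mpr ⟨_, hnC⟩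
      simp only [List.length_append, List.length_singleton]
      omega
    · intro _
      exact Finset.mem_insert_self _ _
  · refine ⟨q, v, V, ?_, hshape, hmarks, Finset.Subset.refl _, hV, fun x hx => hx,
      fun x hx => Or.inl hx, fun x hx => Or.inl hx, le_refl _, ?_⟩
    · simp only [pvBfsStep]
      rw [if_neg hc]
    · intro hEB
      obtain ⟨_, hgn, hval, _⟩ := pvEB_parts hEB
      simp only [pvGoodB, decide_eq_true_eq] at hgn
      simp only at hval
      have hvne : pvVAt v (i + d.1) (j + d.2) ≠ 0 := by
        intro h0
        exact hc ⟨hgn.1, hgn.2.1, hgn.2.2.1, hgn.2.2.2, h0, hval⟩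
      have hmem : (i + d.1, j + d.2) ∈ M0 ∪ V := by
        rw [← hmarks, pvMem_marks]
        exact ⟨by simp only [pvGoodB, decide_eq_true_eq]; exact hgn, hvne⟩
      rcases Finset.mem_union.mp hmem with hmem | hmem
      · exact absurd hmem (hdisj _ (pvCompF_closed hp0 hij hEB))
      · exact hmem
theorem pvBfsFold_spec (g : List (List Int)) (p0 : Int × Int) (M0 : Finset (Int × Int))
    (hdisj : ∀ x ∈ pvCompF g p0, x ∉ M0) (hp0 : pvGoodB p0 = true)
    (i j : Int) (hij : (i, j) ∈ pvCompF g p0) :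
    ∀ (ds : List (Int × Int)), (∀ d ∈ ds, d ∈ pvDirs) →
    ∀ (q : List (Int × Int)) (v : List (List Int)) (V : Finset (Int × Int)),
      pvShape v → pvMarks v = M0 ∪ V → V ⊆ pvCompF g p0 →
    ∃ q' v' V',
      ds.foldl (pvBfsStep g i j) (q, v, (V.card : Int)) = (q', v', (V'.card : Int)) ∧
      pvShape v' ∧ pvMarks v' = M0 ∪ V' ∧ V ⊆ V' ∧ V' ⊆ pvCompF g p0 ∧
      (∀ x ∈ q, x ∈ q') ∧ (∀ x ∈ q', x ∈ q ∨ x ∈ V') ∧ (∀ x ∈ V', x ∈ V ∨ x ∈ q') ∧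
      2 * (pvCompF g p0 \ V').card + q'.length ≤ 2 * (pvCompF g p0 \ V).card + q.length ∧
      (∀ d ∈ ds, pvEB g (i, j) (i + d.1, j + d.2) = true → (i + d.1, j + d.2) ∈ V') := by
  intro ds
  induction ds with
  | nil =>
    intro _ q v V hshape hmarks hV
    exact ⟨q, v, V, rfl, hshape, hmarks, Finset.Subset.refl _, hV, fun x hx => hx,
      fun x hx => Or.inl hx, fun x hx => Or.inl hx, le_refl _, by simp⟩
  | cons d ds ih =>
    intro hds q v V hshape hmarks hV
    obtain ⟨q1, v1, V1, heq1, hsh1, hm1, hVV1, hV1, hq1, hq1b, hV1b, hmeas1, hd1⟩ :=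
      pvBfsStep_spec g p0 M0 hdisj hp0 i j hij d (hds d (by simp)) q v V hshape hmarks hV
    obtain ⟨q', v', V', heq2, hsh2, hm2, hV1V, hV2, hq2, hq2b, hV2b, hmeas2, hd2⟩ :=
      ih (fun x hx => hds x (by simp [hx])) q1 v1 V1 hsh1 hm1 hV1
    refine ⟨q', v', V', ?_, hsh2, hm2, Finset.Subset.trans hVV1 hV1V, hV2,
      fun x hx => hq2 x (hq1 x hx), ?_, ?_, le_trans hmeas2 hmeas1, ?_⟩
    · rw [List.foldl_cons, heq1, heq2]
    · intro x hx
      rcases hq2b x hx with hx1 | hx1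
      · rcases hq1b x hx1 with hx2 | hx2
        · exact Or.inl hx2
        · exact Or.inr (hV1V hx2)
      · exact Or.inr hx1
    · intro x hx
      rcases hV2b x hx with hx1 | hx1
      · rcases hV1b x hx1 with hx2 | hx2
        · exact Or.inl hx2
        · exact Or.inr (hq2 x hx2)
      · exact Or.inr hx1
    · intro e he hEB
      rcases List.mem_cons.mp he with rfl | he
      · exact hV1V (hd1 hEB)
      · exact hd2 e he hEB

theorem pvBfsLoop_nil (g : List (List Int)) (fuel : Nat) (v : List (List Int)) (c : Int) :
    pvBfsLoop g fuel [] v c = (v, c) := by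
  cases fuel <;> rfl

theorem pvBfsLoop_spec (g : List (List Int)) (p0 : Int × Int) (M0 : Finset (Int × Int))
    (hdisj : ∀ x ∈ pvCompF g p0, x ∉ M0) (hp0 : pvGoodB p0 = true) :
    ∀ (fuel : Nat) (q : List (Int × Int)) (v : List (List Int)) (V : Finset (Int × Int)),
      pvShape v → pvMarks v = M0 ∪ V → V ⊆ pvCompF g p0 → p0 ∈ V →
      (∀ x ∈ q, x ∈ V) →
      (∀ x ∈ V, x ∉ q → ∀ y, pvEB g x y = true → y ∈ V) →
      2 * (pvCompF g p0 \ V).card + q.length ≤ fuel →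
      (pvBfsLoop g fuel q v (V.card : Int)).2 = ((pvCompF g p0).card : Int) ∧
      pvMarks (pvBfsLoop g fuel q v (V.card : Int)).1 = M0 ∪ pvCompF g p0 ∧
      pvShape (pvBfsLoop g fuel q v (V.card : Int)).1 := by
  intro fuel
  induction fuel with
  | zero =>
    intro q v V hshape hmarks hV hp0V hq hcl hfuel
    have hqnil : q = [] := by
      cases q with
      | nil => rfl
      | cons a l => simp at hfuel
    subst hqnil
    have hVcomp : V = pvCompF g p0 := by
      apply le_antisymm hV
      exact pvCompF_min (fun x hx y hy => hcl x hx (by simp) y hy) hp0V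
    rw [pvBfsLoop_nil]
    exact ⟨by rw [hVcomp], by rw [hmarks, hVcomp], hshape⟩
  | succ f ih =>
    intro q v V hshape hmarks hV hp0V hq hcl hfuel
    cases q with
    | nil =>
      have hVcomp : V = pvCompF g p0 := by
        apply le_antisymm hV
        exact pvCompF_min (fun x hx y hy => hcl x hx (by simp) y hy) hp0V
      rw [pvBfsLoop_nil]
      exact ⟨by rw [hVcomp], by rw [hmarks, hVcomp], hshape⟩
    | cons hd rest =>
      obtain ⟨i, j⟩ := hd
      have hijV : (i, j) ∈ V := hq _ (by simp)
      have hijC : (i, j) ∈ pvCompF g p0 := hV hijV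
      obtain ⟨q', v', V', heq, hsh', hm', hVV', hV', hqq', hq'b, hV'b, hmeas, hsucc⟩ :=
        pvBfsFold_spec g p0 M0 hdisj hp0 i j hijC pvDirs (fun d hd => hd) rest v V
          hshape hmarks hV
      have hstep : pvBfsLoop g (f + 1) ((i, j) :: rest) v (V.card : Int) =
          pvBfsLoop g f q' v' (V'.card : Int) := by
        show pvBfsLoop g f (pvDirs.foldl (pvBfsStep g i j) (rest, v, (V.card : Int))).1
            (pvDirs.foldl (pvBfsStep g i j) (rest, v, (V.card : Int))).2.1
            (pvDirs.foldl (pvBfsStep g i j) (rest, v, (V.card : Int))).2.2 =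
          pvBfsLoop g f q' v' (V'.card : Int)
        rw [heq]
      rw [hstep]
      apply ih q' v' V' hsh' hm' hV' (hVV' hp0V)
      · intro x hx
        rcases hq'b x hx with hx1 | hx1
        · exact hVV' (hq x (by simp [hx1]))
        · exact hx1
      · intro x hx hxq y hy
        rcases hV'b x hx with hx1 | hx1
        · by_cases hxij : x = (i, j)
          · subst hxij
            obtain ⟨_, _, _, hmem⟩ := pvEB_parts hy
            have hyeq : y = (i + (y.1 - i), j + (y.2 - j)) := by
              obtain ⟨y1, y2⟩ := y
              simp only [Prod.mk.injEq]
              constructor <;> ring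
            rw [hyeq]
            exact hsucc (y.1 - i, y.2 - j) hmem (by rw [← hyeq]; exact hy)
          · have hxrest : x ∉ rest := fun hr => hxq (hqq' x hr)
            have : x ∉ (i, j) :: rest := by
              simp only [List.mem_cons]
              rintro (rfl | hr)
              · exact hxij rfl
              · exact hxrest hr
            exact hVV' (hcl x hx1 this y hy)
        · exact absurd hx1 hxq
      · have : rest.length + 1 = ((i, j) :: rest).length := by simp
        omega
theorem pvDisj {g : List (List Int)} {M0 : Finset (Int × Int)} {p0 : Int × Int}
    (hM0cl : ∀ x ∈ M0, ∀ y, pvEB g x y = true → y ∈ M0)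
    (hp0 : pvGoodB p0 = true) (hnot : p0 ∉ M0) :
    ∀ x ∈ pvCompF g p0, x ∉ M0 := by
  intro x hx hxM
  have hsymm : p0 ∈ pvCompF g x := pvCompF_symm hp0 hx
  have hsub : pvCompF g x ⊆ M0 := pvCompF_min (fun a ha y hy => hM0cl a ha y hy) hxM
  exact hnot (hsub hsymm)

theorem pvBfs_spec (g v : List (List Int)) (si sj : Int) (M0 : Finset (Int × Int))
    (hshape : pvShape v) (hmarks : pvMarks v = M0)
    (hM0cl : ∀ x ∈ M0, ∀ y, pvEB g x y = true → y ∈ M0)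
    (hp0 : pvGoodB (si, sj) = true) (hnot : (si, sj) ∉ M0) :
    (pvBfs g v si sj).2 =
      (if 3 ≤ ((pvCompF g (si, sj)).card : Int) then ((pvCompF g (si, sj)).card : Int) else 0) ∧
    pvMarks (pvBfs g v si sj).1 = M0 ∪ pvCompF g (si, sj) ∧ pvShape (pvBfs g v si sj).1 := by
  have hdisj := pvDisj hM0cl hp0 hnot
  have hgb : 0 ≤ si ∧ si < 5 ∧ 0 ≤ sj ∧ sj < 5 := by
    simpa [pvGoodB] using hp0
  have hsh1 : pvShape (pvVSet v si sj 1) := pvShape_set hshape ⟨hgb.1, hgb.2.1⟩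
  have hm1 : pvMarks (pvVSet v si sj 1) = M0 ∪ {(si, sj)} := by
    have := pvMarks_set (n := (si, sj)) hshape hp0
    simp only at this
    rw [this, hmarks, Finset.union_singleton]
  have hV : ({(si, sj)} : Finset (Int × Int)) ⊆ pvCompF g (si, sj) := by
    simp [Finset.singleton_subset_iff, pvMem_compF_self]
  have hfuel : 2 * (pvCompF g (si, sj) \ {(si, sj)}).card + [(si, sj)].length ≤ 128 := by
    have h1 : (pvCompF g (si, sj) \ {(si, sj)}).card ≤ pvUniv.card :=
      Finset.card_le_card (Finset.Subset.trans Finset.sdiff_subset (pvCompF_subset_univ hp0))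
    rw [pvCard_univ] at h1
    simp only [List.length_singleton]
    omega
  have hspec := pvBfsLoop_spec g (si, sj) M0 hdisj hp0 128 [(si, sj)] (pvVSet v si sj 1)
    {(si, sj)} hsh1 hm1 hV (Finset.mem_singleton_self _)
    (by intro x hx; simpa using List.mem_singleton.mp hx)
    (by intro x hx hxq; exfalso; exact hxq (by simpa using hx))
    hfuel
  have hone : ((({(si, sj)} : Finset (Int × Int)).card : Int)) = 1 := by simp
  rw [hone] at hspec
  obtain ⟨hcnt, hm, hsh⟩ := hspec
  constructor
  · show (if 3 ≤ (pvBfsLoop g 128 [(si, sj)] (pvVSet v si sj 1) 1).2 then _ else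
      ((pvBfsLoop g 128 [(si, sj)] (pvVSet v si sj 1) 1).1, (0 : Int))).2 = _
    rw [hcnt]
    split_ifs <;> rfl
  · constructor
    · show pvMarks (if 3 ≤ (pvBfsLoop g 128 [(si, sj)] (pvVSet v si sj 1) 1).2 then _ else
        ((pvBfsLoop g 128 [(si, sj)] (pvVSet v si sj 1) 1).1, (0 : Int))).1 = _
      split_ifs <;> exact hm
    · show pvShape (if 3 ≤ (pvBfsLoop g 128 [(si, sj)] (pvVSet v si sj 1) 1).2 then _ else
        ((pvBfsLoop g 128 [(si, sj)] (pvVSet v si sj 1) 1).1, (0 : Int))).1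
      split_ifs <;> exact hsh

theorem pvFilter_comp (g : List (List Int)) {p0 : Int × Int} (hp0 : pvGoodB p0 = true) :
    (pvCompF g p0).filter (fun p => 3 ≤ ((pvCompF g p).card : Int)) =
      if 3 ≤ ((pvCompF g p0).card : Int) then pvCompF g p0 else ∅ := by
  split_ifs with hbig
  · apply Finset.filter_true_of_mem
    intro x hx
    rw [pvCompF_class hp0 hx]
    exact hbig
  · apply Finset.filter_false_of_mem
    intro x hx
    rw [pvCompF_class hp0 hx]
    exact hbig

theorem pvOuterFold_spec (g : List (List Int)) :
    ∀ (l : List (Int × Int)), (∀ p ∈ l, pvGoodB p = true) →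
    ∀ (v : List (List Int)) (cnt : Int) (M : Finset (Int × Int)),
      pvShape v → pvMarks v = M → (∀ x ∈ M, ∀ y, pvEB g x y = true → y ∈ M) →
      cnt = ((M.filter (fun p => 3 ≤ ((pvCompF g p).card : Int))).card : Int) →
      ∃ M',
        pvShape (l.foldl (fun (st : List (List Int) × Int) p =>
          if pvVAt st.1 p.1 p.2 = 0 then
            ((pvBfs g st.1 p.1 p.2).1, st.2 + (pvBfs g st.1 p.1 p.2).2)
          else st) (v, cnt)).1 ∧
        pvMarks (l.foldl (fun (st : List (List Int) × Int) p =>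
          if pvVAt st.1 p.1 p.2 = 0 then
            ((pvBfs g st.1 p.1 p.2).1, st.2 + (pvBfs g st.1 p.1 p.2).2)
          else st) (v, cnt)).1 = M' ∧
        (∀ x ∈ M', ∀ y, pvEB g x y = true → y ∈ M') ∧ M ⊆ M' ∧ (∀ p ∈ l, p ∈ M') ∧
        (l.foldl (fun (st : List (List Int) × Int) p =>
          if pvVAt st.1 p.1 p.2 = 0 then
            ((pvBfs g st.1 p.1 p.2).1, st.2 + (pvBfs g st.1 p.1 p.2).2)
          else st) (v, cnt)).2 =
          ((M'.filter (fun p => 3 ≤ ((pvCompF g p).card : Int))).card : Int) := by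
  intro l
  induction l with
  | nil =>
    intro _ v cnt M hshape hmarks hcl hcnt
    exact ⟨M, hshape, hmarks, hcl, Finset.Subset.refl _, by simp, hcnt⟩
  | cons p l ih =>
    intro hgood v cnt M hshape hmarks hcl hcnt
    have hgp : pvGoodB p = true := hgood p (by simp)
    simp only [List.foldl_cons]
    by_cases hvis : pvVAt v p.1 p.2 = 0
    · rw [if_pos hvis]
      have hnot : p ∉ M := by
        rw [← hmarks, pvMem_marks]
        rintro ⟨_, hne⟩
        exact hne hvis
      have hdisj := pvDisj hcl hgp hnot
      obtain ⟨hbcnt, hbm, hbsh⟩ := pvBfs_spec g v p.1 p.2 M hshape hmarks hcl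
        hgp hnot
      have hclosed' : ∀ x ∈ M ∪ pvCompF g (p.1, p.2), ∀ y, pvEB g x y = true →
          y ∈ M ∪ pvCompF g (p.1, p.2) := by
        intro x hx y hy
        rcases Finset.mem_union.mp hx with hx | hx
        · exact Finset.mem_union_left _ (hcl x hx y hy)
        · exact Finset.mem_union_right _ (pvCompF_closed hgp hx hy)
      have hdisjf : Disjoint (M.filter (fun q => 3 ≤ ((pvCompF g q).card : Int)))
          ((pvCompF g (p.1, p.2)).filter (fun q => 3 ≤ ((pvCompF g q).card : Int))) := by
        rw [Finset.disjoint_left]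
        intro a ha hb
        exact hdisj a (Finset.mem_filter.mp hb).1 (Finset.mem_filter.mp ha).1
      have hcnt' : cnt + (pvBfs g v p.1 p.2).2 =
          (((M ∪ pvCompF g (p.1, p.2)).filter
            (fun q => 3 ≤ ((pvCompF g q).card : Int))).card : Int) := by
        rw [Finset.filter_union, Finset.card_union_of_disjoint hdisjf, hbcnt, hcnt,
          pvFilter_comp g hgp]
        split_ifs with hbig
        · rw [Nat.cast_add]
        · rw [Finset.card_empty, Nat.add_zero, add_zero]
      obtain ⟨M', h1, h2, h3, h4, h5, h6⟩ := ih (fun x hx => hgood x (by simp [hx]))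
        (pvBfs g v p.1 p.2).1 (cnt + (pvBfs g v p.1 p.2).2) (M ∪ pvCompF g (p.1, p.2))
        hbsh hbm hclosed' hcnt'
      refine ⟨M', h1, h2, h3, Finset.Subset.trans Finset.subset_union_left h4, ?_, h6⟩
      intro x hx
      rcases List.mem_cons.mp hx with rfl | hx
      · exact h4 (Finset.mem_union_right _ (pvMem_compF_self g x))
      · exact h5 x hx
    · rw [if_neg hvis]
      obtain ⟨M', h1, h2, h3, h4, h5, h6⟩ := ih (fun x hx => hgood x (by simp [hx]))
        v cnt M hshape hmarks hcl hcnt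
      refine ⟨M', h1, h2, h3, h4, ?_, h6⟩
      intro x hx
      rcases List.mem_cons.mp hx with rfl | hx
      · refine h4 ?_
        rw [← hmarks, pvMem_marks]
        exact ⟨hgp, hvis⟩
      · exact h5 x hx
-- ===== assembling port A's value =====
def pvCells : List (Int × Int) :=
  (List.range 5).flatMap (fun i => (List.range 5).map (fun j => ((i : Int), (j : Int))))

theorem pvCells_toFinset : pvCells.toFinset = pvUniv := rfl

theorem pvCells_good : ∀ p ∈ pvCells, pvGoodB p = true := fun p hp =>
  (pvMem_univ p).mp (by rw [← pvCells_toFinset]; exact List.mem_toFinset.mpr hp)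

theorem pvCells_nodup : pvCells.Nodup := by decide

theorem pvFoldl_cells {σ : Type} (F : σ → Int → Int → σ) (init : σ) :
    (List.range 5).foldl (fun st i =>
      (List.range 5).foldl (fun st j => F st (i : Int) (j : Int)) st) init =
    pvCells.foldl (fun st p => F st p.1 p.2) init := by
  rfl

theorem pvFoldl_cellsA (g : List (List Int)) (init : List (List Int) × Int) :
    (List.range 5).foldl (fun (st : List (List Int) × Int) i =>
      (List.range 5).foldl (fun (st : List (List Int) × Int) j =>
        if pvVAt st.1 (i : Int) (j : Int) = 0 then
          ((pvBfs g st.1 (i : Int) (j : Int)).1, st.2 + (pvBfs g st.1 (i : Int) (j : Int)).2)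
        else st) st) init =
    pvCells.foldl (fun (st : List (List Int) × Int) p =>
      if pvVAt st.1 p.1 p.2 = 0 then
        ((pvBfs g st.1 p.1 p.2).1, st.2 + (pvBfs g st.1 p.1 p.2).2)
      else st) init :=
  pvFoldl_cells (fun (st : List (List Int) × Int) i j =>
    if pvVAt st.1 i j = 0 then
      ((pvBfs g st.1 i j).1, st.2 + (pvBfs g st.1 i j).2) else st) init

theorem pvA_value (g : List (List Int)) (clear : Int) :
    count_and_clear g clear =
      ((pvUniv.filter (fun p => 3 ≤ ((pvCompF g p).card : Int))).card : Int) := by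
  show ((List.range 5).foldl (fun (st : List (List Int) × Int) i =>
      (List.range 5).foldl (fun (st : List (List Int) × Int) j =>
        if pvVAt st.1 (i : Int) (j : Int) = 0 then
          ((pvBfs g st.1 (i : Int) (j : Int)).1, st.2 + (pvBfs g st.1 (i : Int) (j : Int)).2)
        else st) st) (List.replicate 5 (List.replicate 5 (0 : Int)), 0)).2 = _
  rw [pvFoldl_cellsA g]
  obtain ⟨M', hsh, hm, hcl, hsub, hall, hval⟩ := pvOuterFold_spec g pvCells pvCells_good
    (List.replicate 5 (List.replicate 5 (0 : Int))) 0 ∅ pvShape_init pvMarks_init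
    (by intro x hx; exact absurd hx (Finset.notMem_empty x))
    (by rw [Finset.filter_empty, Finset.card_empty]; rfl)
  have hMuniv : M' = pvUniv := by
    apply le_antisymm
    · rw [← hm]
      exact Finset.filter_subset _ _
    · intro x hx
      refine hall x ?_
      rw [← pvCells_toFinset] at hx
      exact List.mem_toFinset.mp hx
  rw [hval, hMuniv]
-- ===== port B: the saturation set computes pvCompF =====
theorem pvRangeFold_iterate {α : Type} (f : α → α) (init : α) (n : Nat) :
    (List.range n).foldl (fun c _ => f c) init = f^[n] init := by
  induction n with
  | zero => rfl
  | succ k ih => rw [List.range_succ, List.foldl_append, ih, Function.iterate_succ_apply']; rfl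

def pvNbrStep (g : List (List Int)) (p : Int × Int) (acc : PySem.Set (Int × Int))
    (d : Int × Int) : PySem.Set (Int × Int) :=
  if 0 ≤ p.1 + d.1 ∧ p.1 + d.1 < 5 ∧ 0 ≤ p.2 + d.2 ∧ p.2 + d.2 < 5 ∧
      pvGAt g (p.1 + d.1) (p.2 + d.2) = pvGAt g p.1 p.2 then
    PySem.Set.add acc (p.1 + d.1, p.2 + d.2)
  else acc

theorem pvNbr_mem (g : List (List Int)) (p x : Int × Int) :
    ∀ (ds : List (Int × Int)) (acc : PySem.Set (Int × Int)),
    x ∈ ds.foldl (pvNbrStep g p) acc ↔ x ∈ acc ∨ ∃ d ∈ ds,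
      (0 ≤ p.1 + d.1 ∧ p.1 + d.1 < 5 ∧ 0 ≤ p.2 + d.2 ∧ p.2 + d.2 < 5 ∧
        pvGAt g (p.1 + d.1) (p.2 + d.2) = pvGAt g p.1 p.2) ∧ x = (p.1 + d.1, p.2 + d.2) := by
  intro ds
  induction ds with
  | nil => intro acc; simp
  | cons d ds ih =>
    intro acc
    rw [List.foldl_cons]
    show x ∈ ds.foldl (pvNbrStep g p) (pvNbrStep g p acc d) ↔ _
    rw [ih]
    simp only [pvNbrStep]
    split_ifs with hc
    · rw [PySem.Set.mem_add]
      constructor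
      · rintro ((hx | rfl) | ⟨e, he, hce, rfl⟩)
        · exact Or.inl hx
        · exact Or.inr ⟨d, by simp, hc, rfl⟩
        · exact Or.inr ⟨e, by simp [he], hce, rfl⟩
      · rintro (hx | ⟨e, he, hce, rfl⟩)
        · exact Or.inl (Or.inl hx)
        · rcases List.mem_cons.mp he with rfl | he
          · exact Or.inl (Or.inr rfl)
          · exact Or.inr ⟨e, he, hce, rfl⟩
    · constructor
      · rintro (hx | ⟨e, he, hce, rfl⟩)
        · exact Or.inl hx
        · exact Or.inr ⟨e, by simp [he], hce, rfl⟩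
      · rintro (hx | ⟨e, he, hce, rfl⟩)
        · exact Or.inl hx
        · rcases List.mem_cons.mp he with rfl | he
          · exact absurd hce hc
          · exact Or.inr ⟨e, he, hce, rfl⟩

theorem pvInner_mem (g : List (List Int)) (x : Int × Int) :
    ∀ (cells : List (Int × Int)) (acc : PySem.Set (Int × Int)),
    x ∈ cells.foldl (fun acc p => pvDirsB.foldl (pvNbrStep g p) acc) acc ↔
      x ∈ acc ∨ ∃ p ∈ cells, ∃ d ∈ pvDirsB,
        (0 ≤ p.1 + d.1 ∧ p.1 + d.1 < 5 ∧ 0 ≤ p.2 + d.2 ∧ p.2 + d.2 < 5 ∧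
          pvGAt g (p.1 + d.1) (p.2 + d.2) = pvGAt g p.1 p.2) ∧ x = (p.1 + d.1, p.2 + d.2) := by
  intro cells
  induction cells with
  | nil => intro acc; simp
  | cons p ps ih =>
    intro acc
    rw [List.foldl_cons, ih, pvNbr_mem]
    constructor
    · rintro ((hx | ⟨d, hd, hcd, rfl⟩) | ⟨e, he, hrest⟩)
      · exact Or.inl hx
      · exact Or.inr ⟨p, by simp, d, hd, hcd, rfl⟩
      · exact Or.inr ⟨e, by simp [he], hrest⟩
    · rintro (hx | ⟨e, he, hrest⟩)
      · exact Or.inl (Or.inl hx)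
      · rcases List.mem_cons.mp he with rfl | he
        · obtain ⟨d, hd, hcd, rfl⟩ := hrest
          exact Or.inl (Or.inr ⟨d, hd, hcd, rfl⟩)
        · exact Or.inr ⟨e, he, hrest⟩

theorem pvStepSet_eq (g : List (List Int)) (cells : PySem.Set (Int × Int)) :
    pvStepSet g cells = PySem.Set.union cells
      (cells.foldl (fun acc p => pvDirsB.foldl (pvNbrStep g p) acc) PySem.Set.empty) := rfl

theorem pvStepSet_nodup (g : List (List Int)) (cells : PySem.Set (Int × Int))
    (h : cells.Nodup) : (pvStepSet g cells).Nodup := by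
  rw [pvStepSet_eq]
  exact PySem.Set.nodup_union _ _ h

theorem pvStepSet_mem (g : List (List Int)) (cells : PySem.Set (Int × Int))
    (hgood : ∀ p ∈ cells, pvGoodB p = true) (x : Int × Int) :
    x ∈ pvStepSet g cells ↔ x ∈ cells ∨
      (pvGoodB x = true ∧ ∃ p ∈ cells, pvEB g p x = true) := by
  rw [pvStepSet_eq, PySem.Set.mem_union, pvInner_mem]
  constructor
  · rintro (hx | (hx | ⟨p, hp, d, hd, ⟨hb1, hb2, hb3, hb4, hval⟩, rfl⟩))
    · exact Or.inl hx
    · exact absurd hx (List.not_mem_nil)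
    · refine Or.inr ⟨?_, p, hp, ?_⟩
      · simp only [pvGoodB, decide_eq_true_eq]
        exact ⟨hb1, hb2, hb3, hb4⟩
      · simp only [pvEB, Bool.and_eq_true, decide_eq_true_eq]
        refine ⟨⟨⟨hgood p hp, ?_⟩, hval⟩, ?_⟩
        · simp only [pvGoodB, decide_eq_true_eq]
          exact ⟨hb1, hb2, hb3, hb4⟩
        · have hdd : (p.1 + d.1 - p.1, p.2 + d.2 - p.2) = d := by
            obtain ⟨d1, d2⟩ := d
            simp only [Prod.mk.injEq]
            constructor <;> ring
          rw [hdd]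
          exact hd
  · rintro (hx | ⟨hgx, p, hp, hE⟩)
    · exact Or.inl hx
    · obtain ⟨_, _, hval, hmem⟩ := pvEB_parts hE
      simp only [pvGoodB, decide_eq_true_eq] at hgx
      refine Or.inr (Or.inr ⟨p, hp, (x.1 - p.1, x.2 - p.2), hmem, ?_, ?_⟩)
      · refine ⟨by omega, by omega, by omega, by omega, ?_⟩
        have hx1 : p.1 + (x.1 - p.1) = x.1 := by ring
        have hx2 : p.2 + (x.2 - p.2) = x.2 := by ring
        rw [hx1, hx2]
        exact hval
      · obtain ⟨x1, x2⟩ := x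
        simp only [Prod.mk.injEq]
        constructor <;> ring
theorem pvStepSet_good (g : List (List Int)) (cells : PySem.Set (Int × Int))
    (hgood : ∀ p ∈ cells, pvGoodB p = true) :
    ∀ p ∈ pvStepSet g cells, pvGoodB p = true := by
  intro p hp
  rcases (pvStepSet_mem g cells hgood p).mp hp with hp | ⟨hg, _⟩
  · exact hgood p hp
  · exact hg

theorem pvCompB_spec (g : List (List Int)) (si sj : Int) (h : pvGoodB (si, sj) = true) :
    (pvCompB g si sj).Nodup ∧ (∀ x, x ∈ pvCompB g si sj ↔ x ∈ pvCompF g (si, sj)) := by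
  have hrw : pvCompB g si sj = (pvStepSet g)^[25] (PySem.Set.ofList [(si, sj)]) :=
    pvRangeFold_iterate (pvStepSet g) _ 25
  have hgen : ∀ n, ((pvStepSet g)^[n] (PySem.Set.ofList [(si, sj)])).Nodup ∧
      (∀ p ∈ (pvStepSet g)^[n] (PySem.Set.ofList [(si, sj)]), pvGoodB p = true) ∧
      (∀ x, x ∈ (pvStepSet g)^[n] (PySem.Set.ofList [(si, sj)]) ↔
        x ∈ (pvStepF g)^[n] {(si, sj)}) := by
    intro n
    induction n with
    | zero =>
      refine ⟨PySem.Set.nodup_ofList _, ?_, ?_⟩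
      · intro p hp
        rw [Function.iterate_zero, id_eq, PySem.Set.mem_ofList, List.mem_singleton] at hp
        exact hp ▸ h
      · intro x
        rw [Function.iterate_zero, id_eq, PySem.Set.mem_ofList, List.mem_singleton,
          Function.iterate_zero, id_eq, Finset.mem_singleton]
    | succ k ih =>
      obtain ⟨hnd, hgd, hmem⟩ := ih
      rw [Function.iterate_succ_apply', Function.iterate_succ_apply']
      refine ⟨pvStepSet_nodup g _ hnd, pvStepSet_good g _ hgd, ?_⟩
      intro x
      rw [pvStepSet_mem g _ hgd, pvMem_stepF, hmem]
      constructor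
      · rintro (hx | ⟨hg, p, hp, hE⟩)
        · exact Or.inl hx
        · exact Or.inr ⟨hg, p, (hmem p).mp hp, hE⟩
      · rintro (hx | ⟨hg, p, hp, hE⟩)
        · exact Or.inl hx
        · exact Or.inr ⟨hg, p, (hmem p).mpr hp, hE⟩
  rw [hrw]
  exact ⟨(hgen 25).1, (hgen 25).2.2⟩

theorem pvCompB_len (g : List (List Int)) (si sj : Int) (h : pvGoodB (si, sj) = true) :
    PySem.Set.len (pvCompB g si sj) = ((pvCompF g (si, sj)).card : Int) := by
  obtain ⟨hnd, hmem⟩ := pvCompB_spec g si sj h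
  have hfin : (pvCompB g si sj).toFinset = pvCompF g (si, sj) := by
    ext x
    rw [List.mem_toFinset]
    exact hmem x
  show ((pvCompB g si sj).length : Int) = _
  rw [← List.toFinset_card_of_nodup hnd, hfin]

theorem pvFold_count (P : (Int × Int) → Prop) [DecidablePred P] :
    ∀ (l : List (Int × Int)) (t : Int),
    l.foldl (fun t p => if P p then t + 1 else t) t =
      t + (l.countP (fun p => decide (P p)) : Int) := by
  intro l
  induction l with
  | nil => intro t; simp
  | cons p ps ih =>
    intro t
    rw [List.foldl_cons]
    by_cases h : P p
    · rw [if_pos h, ih, List.countP_cons]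
      simp only [h, decide_true, if_true]
      push_cast
      ring
    · rw [if_neg h, ih, List.countP_cons]
      simp [h]

theorem pvCount_univ (P : (Int × Int) → Prop) [DecidablePred P] :
    pvCells.countP (fun p => decide (P p)) = (pvUniv.filter P).card := by
  have h1 : (pvCells.filter (fun p => decide (P p))).toFinset = pvUniv.filter P := by
    rw [List.toFinset_filter, pvCells_toFinset]
    ext x
    simp [Finset.mem_filter]
  rw [← h1, List.toFinset_card_of_nodup (List.Nodup.filter _ pvCells_nodup),
    List.countP_eq_length_filter]

set_option maxRecDepth 8000 in
theorem pvB_value (g : List (List Int)) (clear : Int) :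
    count_and_clear_alt g clear =
      ((pvUniv.filter (fun p => 3 ≤ ((pvCompF g p).card : Int))).card : Int) := by
  have hstart : count_and_clear_alt g clear =
      (pvCells.map (fun p => pvCompB g p.1 p.2)).foldl
        (fun t c => if 3 ≤ PySem.Set.len c then t + 1 else t) 0 := rfl
  rw [hstart, List.foldl_map]
  rw [PySem.List.foldl_congr_mem pvCells _
    (fun t p => if 3 ≤ ((pvCompF g p).card : Int) then t + 1 else t) 0
    (by intro acc x hx; rw [pvCompB_len g x.1 x.2 (pvCells_good x hx)])]
  rw [pvFold_count (fun p => 3 ≤ ((pvCompF g p).card : Int)) pvCells 0, zero_add,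
    pvCount_univ]

-- ===== VERDICT (by name: the statement is the Claim_ definition above) =====
theorem count_and_clear_spec : Claim_equal_count_and_clear := by
  intro ngrid clear _hdom _hpre
  show count_and_clear ngrid clear = count_and_clear_alt ngrid clear
  rw [pvA_value, pvB_value]
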